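-- pv_equiv track=rewrite | github.com/MaromSv/AdventOfCode | main.py | getCalForString
-- ===== SOURCE A (Python) =====
-- def getCalForString(stringA):
--     num = 0
--     nums = []
--     for i in range(len(stringA)):
--         if stringA[i].isnumeric():
--             nums.append(stringA[i])
--
--     num = int(nums[0] + nums[-1])
--
--
--     return num
-- ===== SOURCE B (Python) =====
-- def getCalForString(stringA):
--     for c in stringA:
--         if c.isnumeric():
--             first = c
--             break
--     for c in reversed(stringA):
--         if c.isnumeric():
--             last = c
--             break
--     return int(first + last)
-- ===== Notes on version B (the rewrite author's own statement) =====
-- stated objective: alternative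
-- what changed: B scans for the first digit from the front and the last digit from the back with early exit, never building the list of all digits that A collects and then indexes.
import Mathlib
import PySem

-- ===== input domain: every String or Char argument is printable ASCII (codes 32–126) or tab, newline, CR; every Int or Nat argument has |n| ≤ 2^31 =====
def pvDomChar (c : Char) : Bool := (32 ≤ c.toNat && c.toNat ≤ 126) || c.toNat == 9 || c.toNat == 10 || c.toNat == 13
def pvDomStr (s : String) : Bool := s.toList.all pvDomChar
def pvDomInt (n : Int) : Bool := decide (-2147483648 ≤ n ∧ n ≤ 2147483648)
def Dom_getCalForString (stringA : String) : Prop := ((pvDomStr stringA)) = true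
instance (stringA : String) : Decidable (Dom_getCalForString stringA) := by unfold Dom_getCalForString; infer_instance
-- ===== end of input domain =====

-- ===== PORT A =====
-- B differs by scanning for first/last digit directly instead of collecting all digits;
-- return-value equivalence on strings containing a digit (Pre_). Char.isnumeric is ported
-- as PySem.Chars.isdigit, exact on the ASCII domain Dom_.
-- A's loop 'for i in range(len(stringA)): if stringA[i].isnumeric(): nums.append(...)'
def pvNumsA (l : List Char) : List Char :=
  (PySem.List.pyRange 0 (l.length) 1).foldl
      (fun nums i =>
        if PySem.Chars.isdigit (PySem.List.pyGetD l i ' ') then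
          nums ++ [PySem.List.pyGetD l i ' ']
        else nums) ([] : List Char)

def getCalForString (stringA : String) : Int :=
  match PySem.List.pyGet? (pvNumsA stringA.toList) 0, PySem.List.pyGet? (pvNumsA stringA.toList) (-1) with
  | some a, some b => (PySem.Int.ofChars? [a, b]).getD 0
  | _, _ => 0

-- ===== PORT B =====
def getCalForString_alt (stringA : String) : Int :=
  match stringA.toList.find? (fun c => PySem.Chars.isdigit c) with
  | none => 0
  | some first =>
    match stringA.toList.reverse.find? (fun c => PySem.Chars.isdigit c) with
    | none => 0
    | some last => (PySem.Int.ofChars? [first, last]).getD 0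

-- ===== PRECONDITION & SPEC =====
-- Pre_ excludes exactly the strings with no digit, on which A raises IndexError (nums[0]).
def Pre_getCalForString (stringA : String) : Prop :=
  stringA.toList.any (fun c => PySem.Chars.isdigit c) = true
instance (stringA : String) : Decidable (Pre_getCalForString stringA) := by
  unfold Pre_getCalForString; infer_instance
def pvWitness_getCalForString : String := "a1b2c"
def Spec_getCalForString (stringA : String) (out : Int) : Prop := out = getCalForString_alt stringA
instance (stringA : String) (out : Int) : Decidable (Spec_getCalForString stringA out) := by unfold Spec_getCalForString; infer_instance

-- ===== CLAIM (what is proved, stated in full; the proofs are below) =====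
def Claim_equal_getCalForString : Prop := ∀ (stringA : String), Dom_getCalForString stringA → Pre_getCalForString stringA → Spec_getCalForString stringA (getCalForString stringA)

-- ===== LEMMAS AND PROOFS =====
theorem head?_filter {α : Type} (p : α → Bool) (l : List α) :
    (l.filter p).head? = l.find? p := by
  induction l with
  | nil => rfl
  | cons x xs ih =>
    by_cases h : p x <;> simp [h, ih]

theorem getLast?_filter {α : Type} (p : α → Bool) (l : List α) :
    (l.filter p).getLast? = l.reverse.find? p := by
  rw [← head?_filter p l.reverse, ← List.head?_reverse]
  simp [List.filter_reverse]

-- A's digit-collecting loop equals filter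
theorem loopA_eq_filter (l : List Char) :
    pvNumsA l = l.filter (fun c => PySem.Chars.isdigit c) := by
  unfold pvNumsA
  rw [PySem.List.foldl_pyRange_zero_pyGetD' l ' '
        (fun nums c => if PySem.Chars.isdigit c then nums ++ [c] else nums) []]
  exact PySem.List.foldl_append_if_eq_filter _ _ _

-- ===== VERDICT (by name: the statement is the Claim_ definition above) =====
theorem getCalForString_spec : Claim_equal_getCalForString := by
  intro s _ hpre
  unfold Spec_getCalForString getCalForString getCalForString_alt
  rw [loopA_eq_filter]
  have hne : s.toList.filter (fun c => PySem.Chars.isdigit c) ≠ [] := by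
    unfold Pre_getCalForString at hpre
    simp only [ne_eq, List.filter_eq_nil_iff]
    intro h
    rcases List.any_eq_true.mp hpre with ⟨c, hc, hd⟩
    exact absurd hd (by simpa using h c hc)
  rw [PySem.List.pyGet?_zero, PySem.List.pyGet?_neg_one,
      ← List.head?_eq_getElem?, head?_filter, getLast?_filter]
  cases s.toList.find? (fun c => PySem.Chars.isdigit c) <;>
    cases s.toList.reverse.find? (fun c => PySem.Chars.isdigit c) <;> rfl
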